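-- pv_equiv track=rewrite | github.com/yannickloth/W33-Theory | scripts/recompute_binary_icosahedral_2A5.py | orbit_partition
-- ===== SOURCE A (Python) =====
-- from collections import Counter, deque
--
-- def orbit_partition(gens, m):
--     visited=set(); orbits=[]
--     for i in range(m):
--         if i in visited: continue
--         orb=[]; dq=deque([i])
--         while dq:
--             x=dq.popleft()
--             if x in visited: continue
--             visited.add(x); orb.append(x)
--             for g in gens: dq.append(g[x])
--         orbits.append(sorted(orb))
--     return orbits
-- ===== SOURCE B (Python) =====
-- def orbit_partition(gens, m):
--     assigned = set()
--     orbits = []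
--     for i in range(m):
--         if i in assigned:
--             continue
--         cls = {i}
--         while True:
--             nxt = cls | {g[x] for x in cls for g in gens if g[x] not in assigned}
--             if nxt == cls:
--                 break
--             cls = nxt
--         assigned |= cls
--         orbits.append(sorted(cls))
--     return orbits
-- ===== Notes on version B (the rewrite author's own statement) =====
-- stated objective: alternative
-- what changed: Replaces A's deque-based BFS with a per-orbit round-based fixpoint saturation: each orbit is grown as a set by repeatedly unioning in the generator images of the whole current set until it stops changing, with no queue, no frontier and no per-element marking order.
-- outside the precondition, e.g. on orbit_partition([[-1, 0]], 2): A returns [[-1, 0], [1]], B returns [[-1, 0], [1]]; on orbit_partition([[0, 0, 5]], 1): A returns [[0]], B returns [[0]]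
import Mathlib
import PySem

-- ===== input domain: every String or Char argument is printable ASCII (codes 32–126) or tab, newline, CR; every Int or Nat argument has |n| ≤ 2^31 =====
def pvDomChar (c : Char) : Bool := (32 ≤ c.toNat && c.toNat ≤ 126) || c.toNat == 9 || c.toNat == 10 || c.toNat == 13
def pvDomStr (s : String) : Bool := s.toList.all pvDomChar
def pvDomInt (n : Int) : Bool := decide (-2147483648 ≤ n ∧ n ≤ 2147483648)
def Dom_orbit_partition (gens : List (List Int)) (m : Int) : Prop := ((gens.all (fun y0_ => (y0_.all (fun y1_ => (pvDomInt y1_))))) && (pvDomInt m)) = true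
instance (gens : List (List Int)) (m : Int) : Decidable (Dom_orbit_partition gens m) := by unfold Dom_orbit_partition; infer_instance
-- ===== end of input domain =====

-- B replaces A's deque-BFS traversal by a per-orbit fixpoint set saturation (objective: alternative, same result).

-- ===== PORT A =====
-- inner `while dq:` loop of A; the fuel argument is only a termination guard
-- (it performs no computation Python does not; under Pre_ it is never exhausted).
-- g[x] is ported as pyGetD g x 0: Python raises IndexError out of range, excluded by Pre_.
def pvBfs (gens : List (List Int)) : Nat → PySem.Set Int → List Int → List Int → PySem.Set Int × List Int
  | _, visited, orb, [] => (visited, orb)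
  | 0, visited, orb, _ :: _ => (visited, orb)
  | fuel+1, visited, orb, x :: dq =>
    if PySem.Set.contains visited x then pvBfs gens fuel visited orb dq
    else pvBfs gens fuel (PySem.Set.add visited x) (orb ++ [x])
      (dq ++ gens.map (fun g => PySem.List.pyGetD g x 0))

def orbit_partition (gens : List (List Int)) (m : Int) : List (List Int) :=
  ((PySem.List.pyRange 0 m 1).foldl
    (fun st i =>
      if PySem.Set.contains st.1 i then st
      else
        let r := pvBfs gens (gens.length * m.toNat + 1) st.1 [] [i]
        (r.1, st.2 ++ [PySem.List.sorted r.2 (fun x => x)]))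
    (PySem.Set.empty, [])).2

-- ===== PORT B =====
-- one-orbit saturation loop of B (`while True: nxt = cls | {...}; …`); fuel is a termination guard only.
def pvSat (gens : List (List Int)) (assigned : PySem.Set Int) : Nat → PySem.Set Int → PySem.Set Int
  | 0, cls => cls
  | fuel+1, cls =>
    let nxt := PySem.Set.union cls (PySem.Set.ofList (cls.flatMap (fun x =>
      (gens.map (fun g => PySem.List.pyGetD g x 0)).filter
        (fun y => !(PySem.Set.contains assigned y)))))
    if PySem.Set.equal nxt cls then cls else pvSat gens assigned fuel nxt

def orbit_partition_alt (gens : List (List Int)) (m : Int) : List (List Int) :=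
  ((PySem.List.pyRange 0 m 1).foldl
    (fun st i =>
      if PySem.Set.contains st.1 i then st
      else
        let cls := pvSat gens st.1 (m.toNat + 1) (PySem.Set.ofList [i])
        (PySem.Set.union st.1 cls, st.2 ++ [PySem.List.sorted cls (fun x => x)]))
    (PySem.Set.empty, [])).2

-- ===== PRECONDITION & SPEC =====
-- Pre_ restricts to the natural domain of the script (generators acting on range(m)): each g
-- is a list of length ≥ m whose values lie in [0, m), or m ≤ 0. Outside it A may raise
-- IndexError, loop forever, or return via Python's negative-index wraparound, a defensible
-- corner no caller of this group-theory helper relies on.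
def Pre_orbit_partition (gens : List (List Int)) (m : Int) : Prop :=
  0 < m → ∀ g ∈ gens, m ≤ (g.length : Int) ∧ ∀ v ∈ g, 0 ≤ v ∧ v < m
instance (gens : List (List Int)) (m : Int) : Decidable (Pre_orbit_partition gens m) := by
  unfold Pre_orbit_partition; infer_instance

def pvWitness_orbit_partition : List (List Int) × Int := ([[1, 0, 2], [0, 1, 2]], 3)

def Spec_orbit_partition (gens : List (List Int)) (m : Int) (out : List (List Int)) : Prop := out = orbit_partition_alt gens m
instance (gens : List (List Int)) (m : Int) (out : List (List Int)) : Decidable (Spec_orbit_partition gens m out) := by unfold Spec_orbit_partition; infer_instance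

-- ===== CLAIM (what is proved, stated in full; the proofs are below) =====
def Claim_equal_orbit_partition : Prop := ∀ (gens : List (List Int)) (m : Int), Dom_orbit_partition gens m → Pre_orbit_partition gens m → Spec_orbit_partition gens m (orbit_partition gens m)

-- ===== LEMMAS AND PROOFS =====

-- generator condition extracted from Pre_ (the form the lemmas use)
def pvG (gens : List (List Int)) (m : Int) : Prop :=
  ∀ g ∈ gens, m ≤ (g.length : Int) ∧ ∀ v ∈ g, 0 ≤ v ∧ v < m

-- elements reachable from i by repeatedly applying generators, never stepping into V
inductive pvReach (gens : List (List Int)) (V : List Int) (i : Int) : Int → Prop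
  | refl : pvReach gens V i i
  | step {x : Int} (g : List Int) (hg : g ∈ gens) (hx : pvReach gens V i x)
      (hnv : PySem.List.pyGetD g x 0 ∉ V) : pvReach gens V i (PySem.List.pyGetD g x 0)

theorem pvGet_range {gens : List (List Int)} {m : Int} (hG : pvG gens m)
    {g : List Int} (hg : g ∈ gens) {x : Int} (hx0 : 0 ≤ x) (hxm : x < m) :
    0 ≤ PySem.List.pyGetD g x 0 ∧ PySem.List.pyGetD g x 0 < m := by
  obtain ⟨hlen, hvals⟩ := hG g hg
  refine hvals _ (PySem.List.pyGetD_mem g 0 ?_)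
  simp [PySem.Raise.InRange]
  omega

theorem pvReach_congr {gens : List (List Int)} {V V' : List Int} {i : Int}
    (h : ∀ x, x ∈ V ↔ x ∈ V') : ∀ z, pvReach gens V i z → pvReach gens V' i z := by
  intro z hz
  induction hz with
  | refl => exact pvReach.refl
  | step g hg hx hnv ih => exact pvReach.step g hg ih (fun hm => hnv ((h _).mpr hm))

theorem pvReach_subset_closed {gens : List (List Int)} {V : List Int} {i : Int} {C : List Int}
    (hiC : i ∈ C)
    (hcl : ∀ x ∈ C, ∀ g ∈ gens, PySem.List.pyGetD g x 0 ∉ V → PySem.List.pyGetD g x 0 ∈ C) :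
    ∀ z, pvReach gens V i z → z ∈ C := by
  intro z hz
  induction hz with
  | refl => exact hiC
  | step g hg hx hnv ih => exact hcl _ ih g hg hnv

theorem pvCountP_drop {l v : List Int} {x : Int} (hnd : l.Nodup) (hx : x ∈ l) (hxv : x ∉ v) :
    l.countP (fun z => decide (z ∉ v ++ [x])) + 1 = l.countP (fun z => decide (z ∉ v)) := by
  induction l with
  | nil => simp at hx
  | cons a t ih =>
    rcases List.nodup_cons.mp hnd with ⟨hat, hndt⟩
    rcases List.mem_cons.mp hx with rfl | hxt
    · have ht : t.countP (fun z => decide (z ∉ v ++ [x])) = t.countP (fun z => decide (z ∉ v)) := by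
        refine List.countP_congr ?_
        intro z hz
        have hza : z ≠ x := fun h => hat (h ▸ hz)
        simp [List.mem_append, hza]
      rw [List.countP_cons, List.countP_cons, ht]
      have h1 : (decide (x ∉ v ++ [x]) : Bool) = false := by simp
      have h2 : (decide (x ∉ v) : Bool) = true := by simpa using hxv
      rw [h1, h2]; simp
    · have hax : a ≠ x := fun h => hat (h ▸ hxt)
      have hpa : (decide (a ∉ v ++ [x]) : Bool) = decide (a ∉ v) := by
        simp [List.mem_append, hax]
      rw [List.countP_cons, List.countP_cons, hpa, ← ih hndt hxt]
      omega

theorem pvBfs_inv (gens : List (List Int)) (m : Int) (v₀ : List Int) (i : Int)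
    (hG : pvG gens m) (hiv : i ∉ v₀) :
    ∀ fuel (orb dq : List Int), orb.Nodup →
    (∀ x ∈ orb, (0 ≤ x ∧ x < m) ∧ x ∉ v₀ ∧ pvReach gens v₀ i x) →
    (∀ y ∈ dq, (0 ≤ y ∧ y < m) ∧ (y ∈ v₀ ++ orb ∨ pvReach gens v₀ i y)) →
    (∀ x ∈ orb, ∀ g ∈ gens,
      PySem.List.pyGetD g x 0 ∈ v₀ ++ orb ∨ PySem.List.pyGetD g x 0 ∈ dq) →
    (i ∈ orb ∨ i ∈ dq) →
    dq.length + gens.length * ((PySem.List.pyRange 0 m 1).countP (fun z => decide (z ∉ v₀ ++ orb))) ≤ fuel →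
    ∃ T, pvBfs gens fuel (v₀ ++ orb) orb dq = (v₀ ++ (orb ++ T), orb ++ T) ∧
      (orb ++ T).Nodup ∧
      (∀ x ∈ orb ++ T, (0 ≤ x ∧ x < m) ∧ x ∉ v₀ ∧ pvReach gens v₀ i x) ∧
      (∀ x ∈ orb ++ T, ∀ g ∈ gens, PySem.List.pyGetD g x 0 ∈ v₀ ++ (orb ++ T)) ∧
      i ∈ orb ++ T := by
  intro fuel
  induction fuel with
  | zero =>
    intro orb dq hnd horb hdq hclose hio hb
    have hdqnil : dq = [] := by
      have := List.length_eq_zero_iff.mp (by omega : dq.length = 0)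
      exact this
    subst hdqnil
    refine ⟨[], by simp [pvBfs], by simpa using hnd, by simpa using horb, ?_, by simpa using hio⟩
    intro x hx g hg
    rcases hclose x (by simpa using hx) g hg with h | h
    · simpa using h
    · simp at h
  | succ fuel ih =>
    intro orb dq hnd horb hdq hclose hio hb
    match dq with
    | [] =>
      refine ⟨[], by simp [pvBfs], by simpa using hnd, by simpa using horb, ?_, by simpa using hio⟩
      intro x hx g hg
      rcases hclose x (by simpa using hx) g hg with h | h
      · simpa using h
      · simp at h
    | x :: dq' =>
      by_cases hc : x ∈ v₀ ++ orb
      · -- x already visited: skipped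
        have hcb : PySem.Set.contains (v₀ ++ orb) x = true := by
          rw [PySem.Set.contains_eq_decide]; exact decide_eq_true hc
        have hres : pvBfs gens (fuel+1) (v₀ ++ orb) orb (x :: dq')
            = pvBfs gens fuel (v₀ ++ orb) orb dq' := by
          simp only [pvBfs, hcb, if_true]
        rw [hres]
        apply ih orb dq' hnd horb
        · exact fun y hy => hdq y (List.mem_cons_of_mem _ hy)
        · intro x' hx' g hg
          rcases hclose x' hx' g hg with h | h
          · exact Or.inl h
          · rcases List.mem_cons.mp h with h' | h'
            · exact Or.inl (h' ▸ hc)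
            · exact Or.inr h'
        · rcases hio with h | h
          · exact Or.inl h
          · rcases List.mem_cons.mp h with h' | h'
            · subst h'
              rcases List.mem_append.mp hc with h'' | h''
              · exact absurd h'' hiv
              · exact Or.inl h''
            · exact Or.inr h'
        · simp only [List.length_cons] at hb
          omega
      · -- x is new: visit it
        obtain ⟨⟨hx0, hxm⟩, hxvr⟩ := hdq x List.mem_cons_self
        have hrx : pvReach gens v₀ i x := by
          rcases hxvr with h | h
          · exact absurd h hc
          · exact h
        have hxnv₀ : x ∉ v₀ := fun h => hc (List.mem_append.mpr (Or.inl h))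
        have hxno : x ∉ orb := fun h => hc (List.mem_append.mpr (Or.inr h))
        have hcb : PySem.Set.contains (v₀ ++ orb) x = false := by
          rw [PySem.Set.contains_eq_decide]; exact decide_eq_false hc
        have hadd : PySem.Set.add (v₀ ++ orb) x = v₀ ++ (orb ++ [x]) := by
          rw [PySem.Set.add_of_not_mem hc, List.append_assoc]
        have hres : pvBfs gens (fuel+1) (v₀ ++ orb) orb (x :: dq')
            = pvBfs gens fuel (v₀ ++ (orb ++ [x])) (orb ++ [x])
                (dq' ++ gens.map (fun g => PySem.List.pyGetD g x 0)) := by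
          simp only [pvBfs, hcb, if_false, Bool.false_eq_true, hadd]
        rw [hres]
        have hcount : ((PySem.List.pyRange 0 m 1).countP
              (fun z => decide (z ∉ v₀ ++ (orb ++ [x])))) + 1
            = (PySem.List.pyRange 0 m 1).countP (fun z => decide (z ∉ v₀ ++ orb)) := by
          have hxr : x ∈ PySem.List.pyRange 0 m 1 := PySem.List.mem_pyRange_one.mpr ⟨hx0, hxm⟩
          have := pvCountP_drop (v := v₀ ++ orb) (PySem.List.nodup_pyRange_one 0 m) hxr hc
          simpa [List.append_assoc] using this
        obtain ⟨T', hT'⟩ := ih (orb ++ [x]) (dq' ++ gens.map (fun g => PySem.List.pyGetD g x 0))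
          (by
            simp only [List.nodup_append, List.nodup_cons, List.nodup_nil, and_true]
            exact ⟨hnd, by simp, fun a ha b hb => fun h => hxno ((h ▸ (by simpa using hb : b = x)) ▸ ha)⟩)
          (by
            intro y hy
            rcases List.mem_append.mp hy with h | h
            · exact horb y h
            · have : y = x := by simpa using h
              exact this ▸ ⟨⟨hx0, hxm⟩, hxnv₀, hrx⟩)
          (by
            intro y hy
            rcases List.mem_append.mp hy with h | h
            · obtain ⟨hr, hvr⟩ := hdq y (List.mem_cons_of_mem _ h)
              refine ⟨hr, ?_⟩
              rcases hvr with h' | h'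
              · exact Or.inl (by rcases List.mem_append.mp h' with h'' | h'' <;>
                  simp [List.mem_append, h''])
              · exact Or.inr h'
            · obtain ⟨g, hg, rfl⟩ := List.mem_map.mp h
              refine ⟨pvGet_range hG hg hx0 hxm, ?_⟩
              by_cases hv : PySem.List.pyGetD g x 0 ∈ v₀
              · exact Or.inl (List.mem_append.mpr (Or.inl hv))
              · exact Or.inr (pvReach.step g hg hrx hv))
          (by
            intro x' hx' g hg
            rcases List.mem_append.mp hx' with h | h
            · rcases hclose x' h g hg with h' | h'
              · exact Or.inl (by rcases List.mem_append.mp h' with h'' | h'' <;>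
                  simp [List.mem_append, h''])
              · rcases List.mem_cons.mp h' with h'' | h''
                · exact Or.inl (by simp [List.mem_append, h''])
                · exact Or.inr (List.mem_append.mpr (Or.inl h''))
            · have hxx : x' = x := by simpa using h
              subst hxx
              exact Or.inr (List.mem_append.mpr (Or.inr (List.mem_map.mpr ⟨g, hg, rfl⟩))))
          (by
            rcases hio with h | h
            · exact Or.inl (List.mem_append.mpr (Or.inl h))
            · rcases List.mem_cons.mp h with h' | h'
              · exact Or.inl (List.mem_append.mpr (Or.inr (by simp [h'])))
              · exact Or.inr (List.mem_append.mpr (Or.inl h')))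
          (by
            simp only [List.length_append, List.length_map, List.length_cons] at hb ⊢
            have hmul : gens.length * ((PySem.List.pyRange 0 m 1).countP (fun z => decide (z ∉ v₀ ++ orb)))
                = gens.length * ((PySem.List.pyRange 0 m 1).countP
                    (fun z => decide (z ∉ v₀ ++ (orb ++ [x])))) + gens.length := by
              rw [← hcount, Nat.mul_succ]
            omega)
        refine ⟨x :: T', ?_⟩
        have hshape : orb ++ [x] ++ T' = orb ++ (x :: T') := by simp
        rw [← hshape]
        exact hT'


theorem pvSat_inv (gens : List (List Int)) (m : Int) (V : List Int) (i : Int)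
    (hG : pvG gens m) (hi0 : 0 ≤ i) (him : i < m) :
    ∀ fuel (cls : List Int), cls.Nodup → i ∈ cls →
    (∀ x ∈ cls, (0 ≤ x ∧ x < m) ∧ x ∉ V ∧ pvReach gens V i x) →
    m.toNat + 1 - cls.length ≤ fuel →
    ∃ C, pvSat gens V fuel cls = C ∧ C.Nodup ∧ i ∈ C ∧
      (∀ x ∈ C, (0 ≤ x ∧ x < m) ∧ x ∉ V ∧ pvReach gens V i x) ∧
      (∀ x ∈ C, ∀ g ∈ gens, PySem.List.pyGetD g x 0 ∉ V → PySem.List.pyGetD g x 0 ∈ C) := by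
  intro fuel
  induction fuel with
  | zero =>
    intro cls hnd hicls hinv hb
    exfalso
    have hsub : cls ⊆ PySem.List.pyRange 0 m 1 := by
      intro x hx
      exact PySem.List.mem_pyRange_one.mpr ⟨(hinv x hx).1.1, (hinv x hx).1.2⟩
    have hlen : cls.length ≤ m.toNat := by
      have := (hnd.subperm hsub).length_le
      simpa [PySem.List.length_pyRange_one] using this
    have hpos : 0 < cls.length := List.length_pos_of_mem hicls
    omega
  | succ fuel ih =>
    intro cls hnd hicls hinv hb
    have hmemnew : ∀ y, y ∈ (cls.flatMap fun x =>
        (gens.map fun g => PySem.List.pyGetD g x 0).filter fun y => !PySem.Set.contains V y) ↔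
        ∃ x ∈ cls, ∃ g ∈ gens, PySem.List.pyGetD g x 0 = y ∧ y ∉ V := by
      intro y
      simp only [List.mem_flatMap, List.mem_filter, List.mem_map, PySem.Set.contains_eq_decide,
        Bool.not_eq_true', decide_eq_false_iff_not]
      constructor
      · rintro ⟨x, hx, ⟨⟨g, hg, rfl⟩, hnv⟩⟩
        exact ⟨x, hx, g, hg, rfl, hnv⟩
      · rintro ⟨x, hx, g, hg, rfl, hnv⟩
        exact ⟨x, hx, ⟨⟨g, hg, rfl⟩, hnv⟩⟩
    set new := (cls.flatMap fun x =>
        (gens.map fun g => PySem.List.pyGetD g x 0).filter fun y => !PySem.Set.contains V y) with hnew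
    have hpropnew : ∀ y ∈ new, (0 ≤ y ∧ y < m) ∧ y ∉ V ∧ pvReach gens V i y := by
      intro y hy
      obtain ⟨x, hx, g, hg, rfl, hnv⟩ := (hmemnew y).mp hy
      obtain ⟨⟨hx0, hxm⟩, _, hrx⟩ := hinv x hx
      exact ⟨pvGet_range hG hg hx0 hxm, hnv, pvReach.step g hg hrx hnv⟩
    set nxt := PySem.Set.union cls (PySem.Set.ofList new) with hnxt
    have hmemnxt : ∀ y, y ∈ nxt ↔ y ∈ cls ∨ y ∈ new := by
      intro y
      rw [hnxt, PySem.Set.mem_union, PySem.Set.mem_ofList]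
    by_cases he : PySem.Set.equal nxt cls = true
    · refine ⟨cls, ?_, hnd, hicls, hinv, ?_⟩
      · simp only [pvSat]
        rw [← hnew, ← hnxt, he, if_pos rfl]
      · intro x hx g hg hnv
        have hyn : PySem.List.pyGetD g x 0 ∈ new :=
          (hmemnew _).mpr ⟨x, hx, g, hg, rfl, hnv⟩
        exact ((PySem.Set.equal_iff nxt cls).mp he _).mp ((hmemnxt _).mpr (Or.inr hyn))
    · have hninv : ∀ x ∈ nxt, (0 ≤ x ∧ x < m) ∧ x ∉ V ∧ pvReach gens V i x := by
        intro x hx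
        rcases (hmemnxt x).mp hx with h | h
        · exact hinv x h
        · exact hpropnew x h
      have hlen : cls.length + 1 ≤ nxt.length := by
        have hsplit : nxt = cls ++ ((PySem.Set.ofList new).filter fun y => !PySem.Set.contains cls y) := by
          rw [hnxt, PySem.Set.union_eq_update, PySem.Set.update_eq_append_filter,
            PySem.Set.ofList_ofList]
        rcases hf : ((PySem.Set.ofList new).filter fun y => !PySem.Set.contains cls y) with _ | ⟨z, zs⟩
        · exfalso
          apply he
          rw [(PySem.Set.equal_iff nxt cls)]
          intro y
          rw [hsplit, hf, List.append_nil]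
        · rw [hsplit, hf]
          simp
      obtain ⟨C, hC, rest⟩ := ih nxt (PySem.Set.nodup_union _ _ hnd)
        ((hmemnxt i).mpr (Or.inl hicls)) hninv (by omega)
      refine ⟨C, ?_, rest⟩
      simp only [pvSat]
      rw [← hnew, ← hnxt, if_neg he]
      exact hC

theorem pvOuter (gens : List (List Int)) (m : Int) (hG : pvG gens m) :
    ∀ (L : List Int), (∀ i ∈ L, 0 ≤ i ∧ i < m) →
    ∀ (vA vB : PySem.Set Int) (out : List (List Int)), vB.Nodup → (∀ x, x ∈ vA ↔ x ∈ vB) →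
    (L.foldl
      (fun st i =>
        if PySem.Set.contains st.1 i then st
        else
          ((pvBfs gens (gens.length * m.toNat + 1) st.1 [] [i]).1,
            st.2 ++ [PySem.List.sorted (pvBfs gens (gens.length * m.toNat + 1) st.1 [] [i]).2 (fun x => x)]))
      (vA, out)).2
    = (L.foldl
      (fun st i =>
        if PySem.Set.contains st.1 i then st
        else
          (PySem.Set.union st.1 (pvSat gens st.1 (m.toNat + 1) (PySem.Set.ofList [i])),
            st.2 ++ [PySem.List.sorted (pvSat gens st.1 (m.toNat + 1) (PySem.Set.ofList [i])) (fun x => x)]))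
      (vB, out)).2 := by
  intro L
  induction L with
  | nil => intro _ vA vB out _ _; rfl
  | cons j L ihL =>
    intro hrange vA vB out hndB hmem
    obtain ⟨hj0, hjm⟩ := hrange j List.mem_cons_self
    simp only [List.foldl_cons]
    by_cases hj : j ∈ vA
    · have hjB : j ∈ vB := (hmem j).mp hj
      have hcA : PySem.Set.contains vA j = true := by
        rw [PySem.Set.contains_eq_decide]; exact decide_eq_true hj
      have hcB : PySem.Set.contains vB j = true := by
        rw [PySem.Set.contains_eq_decide]; exact decide_eq_true hjB
      simp only [hcA, hcB, if_true]
      exact ihL (fun y hy => hrange y (List.mem_cons_of_mem _ hy)) vA vB out hndB hmem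
    · have hjB : j ∉ vB := fun h => hj ((hmem j).mpr h)
      have hcA : PySem.Set.contains vA j = false := by
        rw [PySem.Set.contains_eq_decide]; exact decide_eq_false hj
      have hcB : PySem.Set.contains vB j = false := by
        rw [PySem.Set.contains_eq_decide]; exact decide_eq_false hjB
      -- run A's BFS
      obtain ⟨T, hT⟩ := pvBfs_inv gens m vA j hG hj
        (gens.length * m.toNat + 1) [] [j] List.nodup_nil (by simp)
        (by
          intro y hy
          have : y = j := by simpa using hy
          subst this
          exact ⟨⟨hj0, hjm⟩, Or.inr pvReach.refl⟩)
        (by simp) (by simp)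
        (by
          have hcle : (PySem.List.pyRange 0 m 1).countP (fun z => decide (z ∉ vA ++ [])) ≤ m.toNat := by
            have := List.countP_le_length (p := fun z => decide (z ∉ vA ++ [])) (l := PySem.List.pyRange 0 m 1)
            simpa [PySem.List.length_pyRange_one] using this
          have := Nat.mul_le_mul_left gens.length hcle
          simp only [List.length_cons, List.length_nil]
          omega)
      simp only [List.append_nil, List.nil_append] at hT
      obtain ⟨hTeq, hTnd, hTprop, hTclose, hTi⟩ := hT
      -- run B's saturation
      have hof : PySem.Set.ofList [j] = [j] := PySem.Set.ofList_eq_self_of_nodup [j] (List.nodup_singleton j)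
      obtain ⟨C, hCeq, hCnd, hCi, hCprop, hCclose⟩ := pvSat_inv gens m vB j hG hj0 hjm
        (m.toNat + 1) [j] (by simp) List.mem_cons_self
        (by
          intro y hy
          have : y = j := by simpa using hy
          subst this
          exact ⟨⟨hj0, hjm⟩, hjB, pvReach.refl⟩)
        (by simp)
      -- both orbit sets are the reach set
      have hTmem : ∀ z, z ∈ T ↔ pvReach gens vA j z := by
        intro z
        constructor
        · exact fun h => (hTprop z h).2.2
        · refine pvReach_subset_closed hTi ?_ z
          intro x hx g hg hnv
          rcases List.mem_append.mp (hTclose x hx g hg) with h | h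
          · exact absurd h hnv
          · exact h
      have hCmem : ∀ z, z ∈ C ↔ pvReach gens vA j z := by
        intro z
        constructor
        · exact fun h => pvReach_congr (fun x => (hmem x).symm) z (hCprop z h).2.2
        · intro h
          exact pvReach_subset_closed hCi hCclose z (pvReach_congr hmem z h)
      have hTC : ∀ z, z ∈ T ↔ z ∈ C := fun z => (hTmem z).trans (hCmem z).symm
      have hperm : T.Perm C := (List.perm_ext_iff_of_nodup hTnd hCnd).mpr hTC
      have hsorted : PySem.List.sorted T (fun x => x) = PySem.List.sorted C (fun x => x) :=
        PySem.List.sorted_eq_sorted_of_perm T C (fun x => x) (fun a b h => h) hperm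
      -- step results
      simp only [hcA, hcB, Bool.false_eq_true, if_false, hof, hTeq, hCeq]
      rw [hsorted]
      apply ihL (fun y hy => hrange y (List.mem_cons_of_mem _ hy))
      · exact PySem.Set.nodup_union _ _ hndB
      · intro x
        rw [PySem.Set.mem_union, List.mem_append]
        constructor
        · rintro (h | h)
          · exact Or.inl ((hmem x).mp h)
          · exact Or.inr ((hTC x).mp h)
        · rintro (h | h)
          · exact Or.inl ((hmem x).mpr h)
          · exact Or.inr ((hTC x).mpr h)

-- ===== VERDICT (by name: the statement is the Claim_ definition above) =====
theorem orbit_partition_spec : Claim_equal_orbit_partition := by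
  intro gens m _ hpre
  unfold Spec_orbit_partition orbit_partition orbit_partition_alt
  by_cases hm : 0 < m
  · rw [PySem.Set.empty_eq]
    exact pvOuter gens m (hpre hm) (PySem.List.pyRange 0 m 1)
      (fun i hi => PySem.List.mem_pyRange_one.mp hi) [] [] [] List.nodup_nil (fun _ => Iff.rfl)
  · rw [PySem.List.pyRange_one_eq_nil (by omega)]
    rfl
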